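-- pv_equiv track=rewrite | github.com/Zeydel/Everybody-Codes | The Kingdom of Algorithmia/Quest07/Quest07_part1.py | get_total_essence
-- ===== SOURCE A (Python) =====
-- def get_total_essence(sequence, rounds):
--
--     # Init var for total essence
--     total_essence = 0
--
--     # Starting power
--     power = 10
--
--     # For every round
--     for i in range(rounds):
--
--         # Find out the current action
--         action = sequence[i % len(sequence)]
--
--         # Increment or decrement power
--         if action == '+':
--             power += 1
--         elif action == '-':
--             power -= 1
--
--         # Power cannot be negative
--         if power < 0:
--             power = 0
--
--         # Add the current power to the essence
--         total_essence += power
--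
--     # Return the total
--     return total_essence
-- ===== SOURCE B (Python) =====
-- def get_total_essence(sequence, rounds):
--     if rounds <= 0:
--         return 0
--     L = len(sequence)
--     n, r = divmod(rounds, L)
--     deltas = [1 if c == '+' else -1 if c == '-' else 0 for c in sequence]
--     # per-cycle statistics: S = net change, mn = minimum prefix sum, P = sum of prefix sums
--     pre = 0
--     mn = 0
--     P = 0
--     for d in deltas:
--         pre += d
--         if pre < mn:
--             mn = pre
--         P += pre
--     S = pre
--     total = 0
--     p = 10
--     k = 0
--     while k < n:
--         if S >= 0 and p >= -mn:
--             # no clamp can ever occur again: arithmetic-series closed form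
--             m = n - k
--             total += m * (L * p + P) + L * S * (m * (m - 1) // 2)
--             p += m * S
--             k = n
--             break
--         # simulate one cycle
--         e = 0
--         q = p
--         for d in deltas:
--             q += d
--             if q < 0:
--                 q = 0
--             e += q
--         if q == p:
--             # fixed point: every remaining cycle is identical
--             total += (n - k) * e
--             k = n
--             break
--         total += e
--         p = q
--         k += 1
--     # remainder steps
--     for d in deltas[:r]:
--         p += d
--         if p < 0:
--             p = 0
--         total += p
--     return total
-- ===== Notes on version B (the rewrite author's own statement) =====
-- stated objective: alternative
-- what changed: B replaces A's single per-round loop over range(rounds) by per-cycle analysis: it precomputes one cycle's net change, minimum prefix sum and sum of prefix sums, simulates whole cycles only until the power reaches a fixed point or the clamp-free regime, then extrapolates all remaining cycles with an arithmetic-series closed form (asymptotically cheaper when rounds >> len(sequence), but not measurably faster on the probe's family where rounds is comparable to len(sequence)).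
import Mathlib
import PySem

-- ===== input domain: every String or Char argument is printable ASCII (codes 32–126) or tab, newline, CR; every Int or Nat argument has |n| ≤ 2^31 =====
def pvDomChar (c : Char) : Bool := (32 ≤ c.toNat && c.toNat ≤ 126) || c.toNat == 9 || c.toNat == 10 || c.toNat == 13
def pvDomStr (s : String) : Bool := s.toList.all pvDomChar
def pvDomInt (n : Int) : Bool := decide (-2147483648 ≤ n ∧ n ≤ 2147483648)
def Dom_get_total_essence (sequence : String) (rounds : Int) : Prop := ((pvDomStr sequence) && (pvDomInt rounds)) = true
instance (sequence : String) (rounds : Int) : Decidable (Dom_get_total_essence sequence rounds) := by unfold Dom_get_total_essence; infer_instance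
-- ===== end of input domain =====

-- B replaces A's per-round step loop by per-cycle simulation with early exit to a closed form
-- (arithmetic series once clamping is impossible, or a detected fixed point).

-- ===== PORT A =====
def get_total_essence (sequence : String) (rounds : Int) : Int :=
  ((PySem.List.pyRange 0 rounds 1).foldl
    (fun (st : Int × Int) i =>
      let action := (PySem.Str.pyGet? sequence (PySem.Int.mod i (PySem.Str.len sequence))).getD ' '
      let power := if action = '+' then st.2 + 1 else if action = '-' then st.2 - 1 else st.2
      let power := if power < 0 then 0 else power
      (st.1 + power, power)) ((0 : Int), (10 : Int))).1

-- ===== PORT B =====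
def bCycle (deltas : List Int) (e p : Int) : Int × Int :=
  deltas.foldl (fun (st : Int × Int) d =>
    let q := st.2 + d
    let q := if q < 0 then 0 else q
    (st.1 + q, q)) (e, p)

def bLoop (deltas : List Int) (L S P mn n : Int) : Nat → Int → Int → Int → Int × Int
  | 0, _, total, p => (total, p)
  | fuel+1, k, total, p =>
    if k < n then
      if 0 ≤ S ∧ -mn ≤ p then
        let m := n - k
        (total + m * (L * p + P) + L * S * PySem.Int.floordiv (m * (m - 1)) 2, p + m * S)
      else
        let eq := bCycle deltas 0 p
        if eq.2 = p then (total + (n - k) * eq.1, p)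
        else bLoop deltas L S P mn n fuel (k+1) (total + eq.1) eq.2
    else (total, p)

def get_total_essence_alt (sequence : String) (rounds : Int) : Int :=
  if rounds ≤ 0 then 0
  else
    let deltas := sequence.toList.map (fun c => if c = '+' then (1 : Int) else if c = '-' then -1 else 0)
    let L := PySem.Str.len sequence
    let n := PySem.Int.floordiv rounds L
    let r := PySem.Int.mod rounds L
    let stats := deltas.foldl (fun (st : Int × Int × Int) d =>
      let pre := st.1 + d
      (pre, if pre < st.2.1 then pre else st.2.1, st.2.2 + pre)) ((0 : Int), (0 : Int), (0 : Int))
    let res := bLoop deltas L stats.1 stats.2.2 stats.2.1 n n.toNat 0 0 10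
    (bCycle (PySem.List.slice deltas none (some r)) res.1 res.2).1

-- ===== PRECONDITION & SPEC =====
-- Pre_ excludes only rounds > 0 with an empty sequence, where A raises ZeroDivisionError on i % len(sequence).
def Pre_get_total_essence (sequence : String) (rounds : Int) : Prop := rounds ≤ 0 ∨ sequence ≠ ""
instance (sequence : String) (rounds : Int) : Decidable (Pre_get_total_essence sequence rounds) := by unfold Pre_get_total_essence; infer_instance
def pvWitness_get_total_essence : String × Int := ("++-z-", 23)

def Spec_get_total_essence (sequence : String) (rounds : Int) (out : Int) : Prop := out = get_total_essence_alt sequence rounds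
instance (sequence : String) (rounds : Int) (out : Int) : Decidable (Spec_get_total_essence sequence rounds out) := by unfold Spec_get_total_essence; infer_instance

-- ===== CLAIM (what is proved, stated in full; the proofs are below) =====
def Claim_equal_get_total_essence : Prop := ∀ (sequence : String) (rounds : Int), Dom_get_total_essence sequence rounds → Pre_get_total_essence sequence rounds → Spec_get_total_essence sequence rounds (get_total_essence sequence rounds)

-- ===== LEMMAS AND PROOFS =====

/-- The single-step state update both programs perform per action delta. -/
def pvStep (st : Int × Int) (d : Int) : Int × Int :=
  let q := st.2 + d
  let q := if q < 0 then 0 else q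
  (st.1 + q, q)

/-- `m` full cycles of the delta list. -/
def pvIter (ds : List Int) : Nat → (Int × Int) → Int × Int
  | 0, st => st
  | m+1, st => pvIter ds m (ds.foldl pvStep st)

theorem pvStep_add (ds : List Int) : ∀ (T e p : Int),
    ds.foldl pvStep (T + e, p) = (T + (ds.foldl pvStep (e, p)).1, (ds.foldl pvStep (e, p)).2) := by
  induction ds with
  | nil => intro T e p; simp
  | cons d tl ih =>
    intro T e p
    simp only [List.foldl_cons, pvStep]
    rw [add_assoc, ih]

theorem pvIter_add (ds : List Int) : ∀ (m : Nat) (T e p : Int),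
    pvIter ds m (T + e, p) = (T + (pvIter ds m (e, p)).1, (pvIter ds m (e, p)).2) := by
  intro m
  induction m with
  | zero => intro T e p; simp [pvIter]
  | succ m ih =>
    intro T e p
    simp only [pvIter]
    rw [pvStep_add, ih]

/-- One step of the per-cycle statistics fold. -/
def pvStatStep (st : Int × Int × Int) (d : Int) : Int × Int × Int :=
  let pre := st.1 + d
  (pre, if pre < st.2.1 then pre else st.2.1, st.2.2 + pre)

/-- (net change, minimum prefix sum (≤ 0), sum of prefix sums) of one cycle. -/
def pvStats (ds : List Int) : Int × Int × Int := ds.foldl pvStatStep ((0 : Int), (0 : Int), (0 : Int))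

theorem pvStats_shift (ds : List Int) : ∀ (pre mn P : Int), mn ≤ pre →
    ds.foldl pvStatStep (pre, mn, P) =
      (pre + (pvStats ds).1, min mn (pre + (pvStats ds).2.1),
        P + (ds.length : Int) * pre + (pvStats ds).2.2) := by
  induction ds with
  | nil => intro pre mn P h; simp [pvStats]; omega
  | cons d tl ih =>
    intro pre mn P h
    have hmin : ∀ a b : Int, (if a < b then a else b) = min b a := by
      intro a b; split_ifs with hab <;> omega
    have hstats : pvStats (d :: tl) =
        (d + (pvStats tl).1, min (min 0 d) (d + (pvStats tl).2.1),
          d + (tl.length : Int) * d + (pvStats tl).2.2) := by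
      show tl.foldl pvStatStep (pvStatStep (0,0,0) d) = _
      simp only [pvStatStep, zero_add]
      rw [hmin, ih d (min 0 d) d (by omega)]
    simp only [List.foldl_cons, pvStatStep, hmin]
    rw [ih (pre + d) (min mn (pre + d)) (P + (pre + d)) (by omega), hstats]
    refine Prod.ext ?_ (Prod.ext ?_ ?_) <;> simp only [List.length_cons]
    · ring
    · omega
    · push_cast; ring

theorem pvNoclamp (ds : List Int) : ∀ (e p : Int), 0 ≤ p + (pvStats ds).2.1 →
    ds.foldl pvStep (e, p) =
      (e + (ds.length : Int) * p + (pvStats ds).2.2, p + (pvStats ds).1) := by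
  induction ds with
  | nil => intro e p _; simp [pvStats]
  | cons d tl ih =>
    intro e p h
    have hstats : pvStats (d :: tl) =
        (d + (pvStats tl).1, min (min 0 d) (d + (pvStats tl).2.1),
          d + (tl.length : Int) * d + (pvStats tl).2.2) := by
      show tl.foldl pvStatStep (pvStatStep (0,0,0) d) = _
      simp only [pvStatStep, zero_add]
      rw [show (if d < (0:Int) then d else 0) = min 0 d from by split_ifs <;> omega,
        pvStats_shift tl d (min 0 d) d (by omega)]
    rw [hstats] at h
    simp only at h
    simp only [List.foldl_cons, pvStep, if_neg (show ¬ p + d < 0 by omega)]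
    rw [ih (e + (p + d)) (p + d) (by omega), hstats]
    refine Prod.ext ?_ ?_ <;> simp only [List.length_cons] <;> (push_cast; ring)

theorem pvTri_succ (m : Nat) : (m + 1) * m / 2 = m * (m - 1) / 2 + m := by
  have h : (m + 1) * m = m * (m - 1) + 2 * m := by
    cases m with
    | zero => rfl
    | succ k => simp only [Nat.add_sub_cancel]; ring
  rw [h, show m * (m-1) + 2 * m = m * (m-1) + 2 * m from rfl, Nat.add_mul_div_left _ _ (by omega : 0 < 2)]

theorem pvClosed (ds : List Int) (hS : 0 ≤ (pvStats ds).1) : ∀ (m : Nat) (p : Int),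
    0 ≤ p + (pvStats ds).2.1 →
    pvIter ds m (0, p) =
      ((m : Int) * ((ds.length : Int) * p + (pvStats ds).2.2)
          + (ds.length : Int) * (pvStats ds).1 * ((m * (m - 1) / 2 : Nat) : Int),
        p + (m : Int) * (pvStats ds).1) := by
  intro m
  induction m with
  | zero => intro p _; simp [pvIter]
  | succ m ih =>
    intro p h
    have h2 : 0 ≤ (p + (pvStats ds).1) + (pvStats ds).2.1 := by omega
    simp only [pvIter]
    rw [pvNoclamp ds 0 p h,
      show ((0:Int) + (ds.length : Int) * p + (pvStats ds).2.2, p + (pvStats ds).1)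
        = (((ds.length : Int) * p + (pvStats ds).2.2) + 0, p + (pvStats ds).1) from by ring_nf,
      pvIter_add, ih (p + (pvStats ds).1) h2]
    have htri : (((m + 1) * ((m + 1) - 1) / 2 : Nat) : Int) = ((m * (m - 1) / 2 : Nat) : Int) + (m : Int) := by
      rw [show (m + 1) - 1 = m from rfl, pvTri_succ]; push_cast; ring
    refine Prod.ext ?_ ?_ <;> simp only
    · rw [htri]; push_cast; ring
    · push_cast; ring

theorem pvFixed (ds : List Int) (e p : Int) (h : ds.foldl pvStep (0, p) = (e, p)) :
    ∀ (m : Nat), pvIter ds m (0, p) = ((m : Int) * e, p) := by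
  intro m
  induction m with
  | zero => simp [pvIter]
  | succ m ih =>
    simp only [pvIter]
    rw [h, show (e, p) = (e + 0, p) from by ring_nf, pvIter_add, ih]
    refine Prod.ext ?_ ?_
    · simp only
      push_cast
      ring
    · rfl

theorem bCycle_eq (ds : List Int) (e p : Int) : bCycle ds e p = ds.foldl pvStep (e, p) := rfl

theorem bLoop_eq (ds : List Int) : ∀ (fuel m : Nat) (n k total p : Int), n - k = (m : Int) → m ≤ fuel →
    bLoop ds (ds.length : Int) (pvStats ds).1 (pvStats ds).2.2 (pvStats ds).2.1 n fuel k total p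
      = (total + (pvIter ds m (0, p)).1, (pvIter ds m (0, p)).2) := by
  intro fuel
  induction fuel with
  | zero =>
    intro m n k total p hm hf
    have : m = 0 := by omega
    subst this
    simp [bLoop, pvIter]
  | succ fuel ih =>
    intro m n k total p hm hf
    by_cases hk : k < n
    · have hm1 : 1 ≤ m := by omega
      by_cases hcl : 0 ≤ (pvStats ds).1 ∧ -(pvStats ds).2.1 ≤ p
      · simp only [bLoop, if_pos hk, if_pos hcl]
        rw [pvClosed ds hcl.1 m p (by omega)]
        have hfd : PySem.Int.floordiv ((n - k) * (n - k - 1)) 2 = ((m * (m - 1) / 2 : Nat) : Int) := by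
          rw [hm, show (m : Int) - 1 = ((m - 1 : Nat) : Int) from by push_cast [hm1]; ring,
            show (m : Int) * ((m - 1 : Nat) : Int) = ((m * (m - 1) : Nat) : Int) from by push_cast; ring]
          exact_mod_cast PySem.Int.floordiv_natCast (m * (m - 1)) 2
        rw [hfd, hm]
        refine Prod.ext ?_ ?_ <;> (first | (simp only; ring) | simp only)
      · obtain ⟨m', rfl⟩ : ∃ m', m = m' + 1 := ⟨m - 1, by omega⟩
        simp only [bLoop, if_pos hk, if_neg hcl]
        by_cases hq : (bCycle ds 0 p).2 = p
        · simp only [if_pos hq]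
          have hfix : ds.foldl pvStep (0, p) = ((bCycle ds 0 p).1, p) := by
            rw [← bCycle_eq]; exact Prod.ext rfl hq
          rw [pvFixed ds (bCycle ds 0 p).1 p hfix (m' + 1), hm]
        · simp only [if_neg hq]
          rw [ih m' n (k + 1) (total + (bCycle ds 0 p).1) (bCycle ds 0 p).2 (by omega) (by omega)]
          have : pvIter ds (m' + 1) (0, p) =
              ((bCycle ds 0 p).1 + (pvIter ds m' (0, (bCycle ds 0 p).2)).1,
                (pvIter ds m' (0, (bCycle ds 0 p).2)).2) := by
            simp only [pvIter]
            rw [← bCycle_eq,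
              show bCycle ds 0 p = ((bCycle ds 0 p).1 + 0, (bCycle ds 0 p).2) from by simp,
              pvIter_add]
            simp
          rw [this]
          simp only
          refine Prod.ext ?_ ?_ <;> (first | (simp only; ring) | simp only)
    · have : m = 0 := by omega
      subst this
      simp [bLoop, if_neg hk, pvIter]

/-- The action delta of one character. -/
def pvDelta (c : Char) : Int := if c = '+' then 1 else if c = '-' then -1 else 0

def pvDs (s : String) : List Int := s.toList.map pvDelta

/-- The delta stream of the first `t` rounds (cyclic indexing). -/
def pvDsOf (ds : List Int) (t : Nat) : List Int :=
  (List.range t).map (fun k => ds.getD (k % ds.length) 0)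

theorem pvDsOf_take (ds : List Int) (r : Nat) (hr : r ≤ ds.length) : pvDsOf ds r = ds.take r := by
  apply List.ext_getElem
  · simp [pvDsOf]; omega
  · intro k h1 h2
    have hk : k < ds.length := by simp only [pvDsOf, List.length_map, List.length_range] at h1; omega
    simp only [pvDsOf, List.getElem_map, List.getElem_range, List.getElem_take]
    rw [Nat.mod_eq_of_lt hk, List.getD_eq_getElem ds 0 hk]

theorem pvDsOf_add (ds : List Int) (u : Nat) : pvDsOf ds (ds.length + u) = ds ++ pvDsOf ds u := by
  unfold pvDsOf
  rw [List.range_add, List.map_append, List.map_map]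
  congr 1
  · exact (pvDsOf_take ds ds.length le_rfl).trans List.take_length
  · have hfun : ((fun k => ds.getD (k % ds.length) 0) ∘ (fun k => ds.length + k))
        = fun k => ds.getD (k % ds.length) 0 := by
      funext k; simp [Nat.add_mod_left]
    rw [hfun]

theorem pvA_split (ds : List Int) : ∀ (m : Nat) (st : Int × Int) (r : Nat), r ≤ ds.length →
    (pvDsOf ds (m * ds.length + r)).foldl pvStep st = (ds.take r).foldl pvStep (pvIter ds m st) := by
  intro m
  induction m with
  | zero => intro st r hr; simp only [Nat.zero_mul, Nat.zero_add, pvIter]; rw [pvDsOf_take ds r hr]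
  | succ m ih =>
    intro st r hr
    rw [show (m + 1) * ds.length + r = ds.length + (m * ds.length + r) from by ring,
      pvDsOf_add, List.foldl_append]
    simp only [pvIter]
    exact ih (ds.foldl pvStep st) r hr

theorem pvA_eq (seq : String) (rounds : Int) (h : seq.toList ≠ []) :
    get_total_essence seq rounds
      = ((pvDsOf (pvDs seq) rounds.toNat).foldl pvStep ((0 : Int), (10 : Int))).1 := by
  have hL : 0 < seq.toList.length := List.length_pos_of_ne_nil h
  unfold get_total_essence
  rw [PySem.List.pyRange_one 0 rounds]
  simp only [sub_zero]
  rw [List.foldl_map]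
  unfold pvDsOf
  rw [List.foldl_map]
  congr 1
  apply List.foldl_ext
  intro st k _
  have hlen : (pvDs seq).length = seq.toList.length := by simp [pvDs]
  simp only [zero_add, PySem.Str.len_eq, PySem.Int.mod_natCast,
    PySem.Str.pyGet?_natCast, hlen]
  have hk : k % seq.toList.length < seq.toList.length := Nat.mod_lt k hL
  rw [List.getElem?_eq_getElem hk]
  rw [List.getD_eq_getElem (pvDs seq) 0 (by rw [hlen]; exact hk),
    show (pvDs seq)[k % seq.toList.length]'(by rw [hlen]; exact hk)
      = pvDelta (seq.toList[k % seq.toList.length]'hk) from by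
    simp only [pvDs, List.getElem_map]]
  simp only [Option.getD_some, pvStep, pvDelta]
  by_cases hp : seq.toList[k % seq.toList.length]'hk = '+'
  · simp only [hp, reduceIte]
  · by_cases hm : seq.toList[k % seq.toList.length]'hk = '-'
    · simp only [hm, reduceIte]
      rw [Prod.ext_iff]
      constructor <;> simp only <;> split_ifs <;> omega
    · simp only [hp, hm]
      rw [Prod.ext_iff]
      constructor <;> simp only <;> split_ifs <;> omega

-- ===== VERDICT (by name: the statement is the Claim_ definition above) =====
theorem get_total_essence_spec : Claim_equal_get_total_essence := by
  intro seq rounds _ hpre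
  unfold Spec_get_total_essence
  by_cases hr : rounds ≤ 0
  · have hA : get_total_essence seq rounds = 0 := by
      unfold get_total_essence
      rw [PySem.List.pyRange_one_eq_nil hr]
      rfl
    have hB : get_total_essence_alt seq rounds = 0 := by
      unfold get_total_essence_alt
      rw [if_pos hr]
    rw [hA, hB]
  · have hpos : 0 < rounds := by omega
    have hne : seq.toList ≠ [] := by
      cases hpre with
      | inl h => omega
      | inr h => intro hc; exact h (String.toList_eq_nil_iff.mp hc)
    have hlen : (pvDs seq).length = seq.toList.length := by simp [pvDs]
    have hL : 0 < (pvDs seq).length := by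
      rw [hlen]; exact List.length_pos_of_ne_nil hne
    have hts : rounds = (rounds.toNat : Int) := (Int.toNat_of_nonneg hpos.le).symm
    have hsplit : rounds.toNat = rounds.toNat / (pvDs seq).length * (pvDs seq).length
        + rounds.toNat % (pvDs seq).length := by
      rw [Nat.mul_comm]; exact (Nat.div_add_mod _ _).symm
    rw [pvA_eq seq rounds hne]
    rw [show pvDsOf (pvDs seq) rounds.toNat
        = pvDsOf (pvDs seq) (rounds.toNat / (pvDs seq).length * (pvDs seq).length
          + rounds.toNat % (pvDs seq).length) from by rw [← hsplit]]
    rw [pvA_split (pvDs seq) _ _ _ (Nat.mod_lt _ hL).le]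
    unfold get_total_essence_alt
    rw [if_neg hr]
    simp only
    rw [show seq.toList.map (fun c => if c = '+' then (1 : Int) else if c = '-' then -1 else 0)
        = pvDs seq from rfl]
    rw [PySem.Str.len_eq, ← hlen, hts, PySem.Int.floordiv_natCast, PySem.Int.mod_natCast,
      Int.toNat_natCast]
    rw [show ((pvDs seq).foldl (fun (st : Int × Int × Int) d =>
        let pre := st.1 + d
        (pre, if pre < st.2.1 then pre else st.2.1, st.2.2 + pre)) ((0:Int),(0:Int),(0:Int)))
      = pvStats (pvDs seq) from rfl]
    rw [Int.toNat_natCast]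
    rw [bLoop_eq (pvDs seq) (rounds.toNat / (pvDs seq).length) (rounds.toNat / (pvDs seq).length)
      ((rounds.toNat / (pvDs seq).length : Nat) : Int) 0 0 10 (by omega) le_rfl]
    rw [PySem.List.slice_to_natCast]
    rw [bCycle_eq]
    simp
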